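-- pv_equiv track=rewrite | github.com/sectormkk-ship-it/AnimeTemp | catalogo/views.py | convertir_emojis
-- ===== SOURCE A (Python) =====
-- def convertir_emojis(texto):
--     emojis = {
--         ":naruto:": '<img src="/static/emojis/naruto.png" class="emoji-anime">',
--         ":luffy:": '<img src="/static/emojis/luffy.png" class="emoji-anime">',
--         ":gojo:": '<img src="/static/emojis/gojo.png" class="emoji-anime">',
--         ":nezuko:": '<img src="/static/emojis/nezuko.png" class="emoji-anime">',
--     }
--
--     for codigo, imagen in emojis.items():
--         texto = texto.replace(codigo, imagen)
--
--     return texto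
-- ===== SOURCE B (Python) =====
-- def convertir_emojis(texto):
--     emojis = {
--         ":naruto:": '<img src="/static/emojis/naruto.png" class="emoji-anime">',
--         ":luffy:": '<img src="/static/emojis/luffy.png" class="emoji-anime">',
--         ":gojo:": '<img src="/static/emojis/gojo.png" class="emoji-anime">',
--         ":nezuko:": '<img src="/static/emojis/nezuko.png" class="emoji-anime">',
--     }
--
--     partes = []
--     i = 0
--     n = len(texto)
--     while i < n:
--         for codigo, imagen in emojis.items():
--             if texto.startswith(codigo, i):
--                 partes.append(imagen)
--                 i += len(codigo)
--                 break
--         else: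
--             partes.append(texto[i])
--             i += 1
--
--     return ''.join(partes)
-- ===== Notes on version B (the rewrite author's own statement) =====
-- stated objective: alternative
-- what changed: A runs four sequential full-string str.replace passes (one per dict entry); B makes a single left-to-right scan over the text, trying the emoji codes of the same dict at each position and emitting the matched img tag or the character, joining the pieces at the end.
import Mathlib
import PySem

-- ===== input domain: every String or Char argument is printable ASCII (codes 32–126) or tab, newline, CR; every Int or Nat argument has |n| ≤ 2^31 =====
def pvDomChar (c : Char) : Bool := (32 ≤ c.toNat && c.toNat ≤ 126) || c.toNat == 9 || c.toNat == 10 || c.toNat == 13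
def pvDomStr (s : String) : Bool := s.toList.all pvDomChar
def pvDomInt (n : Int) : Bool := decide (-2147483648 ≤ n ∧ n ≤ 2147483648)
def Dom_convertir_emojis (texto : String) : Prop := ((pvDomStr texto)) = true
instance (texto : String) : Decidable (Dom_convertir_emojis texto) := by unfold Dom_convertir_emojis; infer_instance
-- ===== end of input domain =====

-- B replaces A's four sequential full-string `str.replace` passes by ONE left-to-right scan that
-- tries the emoji codes of the same dict at each position; equivalence is proved on texts without
-- overlapping code occurrences (see Pre_ below).

-- ===== PORT A =====
def convertir_emojis (texto : String) : String :=
  -- the dict literal, as an association list in insertion order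
  let emojis : List (String × String) :=
    [(":naruto:", "<img src=\"/static/emojis/naruto.png\" class=\"emoji-anime\">"),
     (":luffy:", "<img src=\"/static/emojis/luffy.png\" class=\"emoji-anime\">"),
     (":gojo:", "<img src=\"/static/emojis/gojo.png\" class=\"emoji-anime\">"),
     (":nezuko:", "<img src=\"/static/emojis/nezuko.png\" class=\"emoji-anime\">")]
  -- for codigo, imagen in emojis.items(): texto = texto.replace(codigo, imagen)
  emojis.foldl (fun t p => PySem.Str.replace t p.1 p.2) texto

-- ===== PORT B =====
def pvK1 : List Char := [':', 'n', 'a', 'r', 'u', 't', 'o', ':']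
def pvK2 : List Char := [':', 'l', 'u', 'f', 'f', 'y', ':']
def pvK3 : List Char := [':', 'g', 'o', 'j', 'o', ':']
def pvK4 : List Char := [':', 'n', 'e', 'z', 'u', 'k', 'o', ':']
def pvV1 : List Char := ("<img src=\"/static/emojis/naruto.png\" class=\"emoji-anime\">" : String).toList
def pvV2 : List Char := ("<img src=\"/static/emojis/luffy.png\" class=\"emoji-anime\">" : String).toList
def pvV3 : List Char := ("<img src=\"/static/emojis/gojo.png\" class=\"emoji-anime\">" : String).toList
def pvV4 : List Char := ("<img src=\"/static/emojis/nezuko.png\" class=\"emoji-anime\">" : String).toList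

-- the same dict, on code points
def pvEmojiPairs : List (List Char × List Char) :=
  [(pvK1, pvV1), (pvK2, pvV2), (pvK3, pvV3), (pvK4, pvV4)]

-- the inner `for … break` loop of Source B: first dict entry whose code starts at this position
def pvFirstMatch (l : List Char) : List (List Char × List Char) → Option (List Char × List Char)
  | [] => none
  | p :: ps => if p.1.isPrefixOf l then some p else pvFirstMatch l ps

-- needed by pvScan's termination proof
theorem pvFirstMatch_mem (l : List Char) :
    ∀ (ps : List (List Char × List Char)) (p : List Char × List Char),
      pvFirstMatch l ps = some p → p ∈ ps := by
  intro ps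
  induction ps with
  | nil => intro p h; simp [pvFirstMatch] at h
  | cons q qs ih =>
    intro p h
    by_cases hq : q.1.isPrefixOf l
    · simp [pvFirstMatch, hq] at h; simp [h]
    · simp [pvFirstMatch, hq] at h
      exact List.mem_cons_of_mem _ (ih p h)

-- the outer while-loop of Source B: one left-to-right scan over the text
def pvScan : List Char → List Char
  | [] => []
  | c :: t =>
    match h : pvFirstMatch (c :: t) pvEmojiPairs with
    | some p => p.2 ++ pvScan ((c :: t).drop p.1.length)
    | none => c :: pvScan t
termination_by l => l.length
decreasing_by
  · have hm := pvFirstMatch_mem _ _ _ h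
    fin_cases hm <;> simp [pvK1, pvK2, pvK3, pvK4]
  · simp

def convertir_emojis_alt (texto : String) : String :=
  String.ofList (pvScan texto.toList)

-- ===== PRECONDITION & SPEC =====
-- Pre_ excludes texts in which an emoji-code occurrence is overlapped (sharing its closing colon)
-- by an occurrence of a code that comes EARLIER in the dict: there A's fixed pass order replaces
-- the right-hand code while a left-to-right scan replaces the left-hand one — both resolutions of
-- the overlap are defensible and neither is specified.
def Pre_convertir_emojis (texto : String) : Prop :=
  PySem.Str.isIn ":luffy:naruto:" texto = false ∧
  PySem.Str.isIn ":gojo:naruto:" texto = false ∧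
  PySem.Str.isIn ":gojo:luffy:" texto = false ∧
  PySem.Str.isIn ":nezuko:naruto:" texto = false ∧
  PySem.Str.isIn ":nezuko:luffy:" texto = false ∧
  PySem.Str.isIn ":nezuko:gojo:" texto = false
instance (texto : String) : Decidable (Pre_convertir_emojis texto) := by
  unfold Pre_convertir_emojis; infer_instance

def pvWitness_convertir_emojis : String := "hola :naruto: y :gojo: !"

def Spec_convertir_emojis (texto : String) (out : String) : Prop := out = convertir_emojis_alt texto
instance (texto : String) (out : String) : Decidable (Spec_convertir_emojis texto out) := by unfold Spec_convertir_emojis; infer_instance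

-- ===== CLAIM (what is proved, stated in full; the proofs are below) =====
def Claim_equal_convertir_emojis : Prop := ∀ (texto : String), Dom_convertir_emojis texto → Pre_convertir_emojis texto → Spec_convertir_emojis texto (convertir_emojis texto)

-- ===== LEMMAS AND PROOFS =====

-- a plain structural version of CPython's str.replace scan (old ≠ [] in every use)
def pvRep (old new : List Char) : List Char → List Char
  | [] => []
  | c :: t =>
    if h : old.isPrefixOf (c :: t) = true ∧ old ≠ [] then
      new ++ pvRep old new ((c :: t).drop old.length)
    else
      c :: pvRep old new t
termination_by l => l.length
decreasing_by
  · rcases h with ⟨-, hne⟩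
    cases old with
    | nil => exact absurd rfl hne
    | cons o ot => simp
  · simp

theorem pvRep_go (old new : List Char) (hne : old ≠ []) :
    ∀ (fuel : Nat) (l acc : List Char), l.length ≤ fuel →
      PySem.Chars.replace.go old new fuel l acc = acc.reverse ++ pvRep old new l := by
  intro fuel
  induction fuel with
  | zero =>
    intro l acc hl
    have : l = [] := List.eq_nil_of_length_eq_zero (Nat.le_zero.mp hl)
    subst this
    simp [PySem.Chars.replace.go, pvRep]
  | succ n ih =>
    intro l acc hl
    cases l with
    | nil => simp [PySem.Chars.replace.go, pvRep]
    | cons c t =>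
      by_cases hp : old.isPrefixOf (c :: t) = true
      · rw [PySem.Chars.replace.go, if_pos hp]
        have hlen : ((c :: t).drop old.length).length ≤ n := by
          have : 0 < old.length := List.length_pos_of_ne_nil hne
          simp at hl ⊢
          omega
        rw [ih _ _ hlen, pvRep, dif_pos ⟨hp, hne⟩]
        simp
      · rw [PySem.Chars.replace.go, if_neg hp]
        have hlen : t.length ≤ n := by simp at hl; omega
        rw [ih _ _ hlen, pvRep, dif_neg (by intro ⟨h1, _⟩; exact hp h1)]
        simp

theorem replace_eq_pvRep (l old new : List Char) (hne : old ≠ []) :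
    PySem.Chars.replace l old new = pvRep old new l := by
  rw [PySem.Chars.replace, if_neg (by simpa using hne)]
  rw [pvRep_go old new hne l.length l [] le_rfl]
  simp

theorem pvRep_cons (old new : List Char) (c : Char) (t : List Char)
    (h : ¬ old <+: (c :: t)) :
    pvRep old new (c :: t) = c :: pvRep old new t := by
  rw [pvRep]
  rw [dif_neg]
  intro ⟨h1, _⟩
  exact h (List.isPrefixOf_iff_prefix.mp h1)

theorem pvRep_head_match (old new X : List Char) (hne : old ≠ []) :
    pvRep old new (old ++ X) = new ++ pvRep old new X := by
  cases old with
  | nil => exact absurd rfl hne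
  | cons o ot =>
    rw [List.cons_append, pvRep, dif_pos]
    · simp
    · constructor
      · exact List.isPrefixOf_iff_prefix.mpr (by rw [← List.cons_append]; exact List.prefix_append _ _)
      · simp

-- nothing prefixed by '<' can be replaced into existence: a '<'-free prefix of the output
-- was already a prefix of the input
theorem pvRep_no_lt_prefix (old new : List Char) (hhd : new.head? = some '<') :
    ∀ (t u : List Char), ('<' ∉ u) → u <+: pvRep old new t → u <+: t := by
  suffices H : ∀ (n : Nat) (t u : List Char), t.length ≤ n → ('<' ∉ u) → u <+: pvRep old new t → u <+: t by
    intro t u h1 h2; exact H t.length t u le_rfl h1 h2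
  intro n
  induction n with
  | zero =>
    intro t u ht _ h
    have : t = [] := List.eq_nil_of_length_eq_zero (Nat.le_zero.mp ht)
    subst this; simpa [pvRep] using h
  | succ n ih =>
    intro t u ht hlt hu
    cases t with
    | nil => simpa [pvRep] using hu
    | cons c t =>
    by_cases h : old.isPrefixOf (c :: t) = true ∧ old ≠ []
    · rw [pvRep, dif_pos h] at hu
      cases u with
      | nil => exact List.nil_prefix
      | cons d u' =>
        cases new with
        | nil => simp at hhd
        | cons e new' =>
          simp at hhd; subst hhd
          rw [List.cons_append, List.cons_prefix_cons] at hu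
          exact absurd (hu.1 ▸ List.mem_cons_self) hlt
    · rw [pvRep, dif_neg h] at hu
      cases u with
      | nil => exact List.nil_prefix
      | cons d u' =>
        rw [List.cons_prefix_cons] at hu ⊢
        refine ⟨hu.1, ih t u' (by simp at ht; omega) (fun hm => hlt (List.mem_cons_of_mem _ hm)) hu.2⟩

-- a replace pass shifts over a region where no occurrence starts
theorem pvRep_shift (old new : List Char) :
    ∀ (a X : List Char), (∀ j, j < a.length → ¬ old <+: (a ++ X).drop j) →
      pvRep old new (a ++ X) = a ++ pvRep old new X := by
  intro a
  induction a with
  | nil => intro X _; simp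
  | cons d a' ih =>
    intro X hj
    rw [List.cons_append, pvRep, dif_neg]
    · rw [ih X (fun j hjl => by
        have := hj (j+1) (by simp; omega)
        simpa using this)]
      simp
    · intro ⟨h1, _⟩
      exact hj 0 (by simp) (by simpa using List.isPrefixOf_iff_prefix.mp h1)

-- a replace pass shifts over a colon-free region when the code starts with ':'
theorem pvRep_shift_nocolon (old new : List Char) (hhd : old.head? = some ':') :
    ∀ (a X : List Char), (':' ∉ a) →
      pvRep old new (a ++ X) = a ++ pvRep old new X := by
  intro a
  induction a with
  | nil => intro X _; simp
  | cons d a' ih =>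
    intro X hc
    rw [List.cons_append, pvRep, dif_neg]
    · rw [ih X (fun hm => hc (List.mem_cons_of_mem _ hm))]
      simp
    · intro ⟨h1, _⟩
      cases old with
      | nil => simp at hhd
      | cons o ot =>
        simp at hhd; subst hhd
        have := List.isPrefixOf_iff_prefix.mp h1
        rw [List.cons_prefix_cons] at this
        exact hc (this.1 ▸ List.mem_cons_self)

theorem not_prefix_append {α : Type} (k a X : List α) (h1 : ¬ k <+: a) (h2 : ¬ a <+: k) :
    ¬ k <+: a ++ X := by
  intro h
  rcases List.prefix_or_prefix_of_prefix h (List.prefix_append a X) with h' | h'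
  · exact h1 h'
  · exact h2 h'

theorem pvScan_nil : pvScan [] = [] := by simp [pvScan]

theorem pvScan_match1 (r : List Char) : pvScan (pvK1 ++ r) = pvV1 ++ pvScan r := by
  have hm : pvFirstMatch (pvK1 ++ r) pvEmojiPairs = some (pvK1, pvV1) := by
    simp [pvFirstMatch, pvEmojiPairs, List.isPrefixOf_iff_prefix, List.prefix_append]
  rw [show pvK1 ++ r = ':' :: (pvK1.drop 1 ++ r) by simp [pvK1], pvScan]
  rw [show (':' : Char) :: (pvK1.drop 1 ++ r) = pvK1 ++ r by simp [pvK1]]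
  split
  · next p heq =>
    rw [hm] at heq
    injection heq with heq
    subst heq
    simp [pvK1]
  · next heq => rw [hm] at heq; exact absurd heq (by simp)

theorem pvScan_match2 (r : List Char) : pvScan (pvK2 ++ r) = pvV2 ++ pvScan r := by
  have h1 : pvK1.isPrefixOf (pvK2 ++ r) = false := by
    rw [← Bool.not_eq_true, List.isPrefixOf_iff_prefix]
    exact not_prefix_append pvK1 pvK2 r (by decide) (by decide)
  have hm : pvFirstMatch (pvK2 ++ r) pvEmojiPairs = some (pvK2, pvV2) := by
    simp [pvFirstMatch, pvEmojiPairs, h1, List.isPrefixOf_iff_prefix, List.prefix_append]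
  rw [show pvK2 ++ r = ':' :: (pvK2.drop 1 ++ r) by simp [pvK2], pvScan]
  rw [show (':' : Char) :: (pvK2.drop 1 ++ r) = pvK2 ++ r by simp [pvK2]]
  split
  · next p heq =>
    rw [hm] at heq
    injection heq with heq
    subst heq
    simp [pvK2]
  · next heq => rw [hm] at heq; exact absurd heq (by simp)

theorem pvScan_match3 (r : List Char) : pvScan (pvK3 ++ r) = pvV3 ++ pvScan r := by
  have h1 : pvK1.isPrefixOf (pvK3 ++ r) = false := by
    rw [← Bool.not_eq_true, List.isPrefixOf_iff_prefix]
    exact not_prefix_append pvK1 pvK3 r (by decide) (by decide)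
  have h2 : pvK2.isPrefixOf (pvK3 ++ r) = false := by
    rw [← Bool.not_eq_true, List.isPrefixOf_iff_prefix]
    exact not_prefix_append pvK2 pvK3 r (by decide) (by decide)
  have hm : pvFirstMatch (pvK3 ++ r) pvEmojiPairs = some (pvK3, pvV3) := by
    simp [pvFirstMatch, pvEmojiPairs, h1, h2, List.isPrefixOf_iff_prefix, List.prefix_append]
  rw [show pvK3 ++ r = ':' :: (pvK3.drop 1 ++ r) by simp [pvK3], pvScan]
  rw [show (':' : Char) :: (pvK3.drop 1 ++ r) = pvK3 ++ r by simp [pvK3]]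
  split
  · next p heq =>
    rw [hm] at heq
    injection heq with heq
    subst heq
    simp [pvK3]
  · next heq => rw [hm] at heq; exact absurd heq (by simp)

theorem pvScan_match4 (r : List Char) : pvScan (pvK4 ++ r) = pvV4 ++ pvScan r := by
  have h1 : pvK1.isPrefixOf (pvK4 ++ r) = false := by
    rw [← Bool.not_eq_true, List.isPrefixOf_iff_prefix]
    exact not_prefix_append pvK1 pvK4 r (by decide) (by decide)
  have h2 : pvK2.isPrefixOf (pvK4 ++ r) = false := by
    rw [← Bool.not_eq_true, List.isPrefixOf_iff_prefix]
    exact not_prefix_append pvK2 pvK4 r (by decide) (by decide)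
  have h3 : pvK3.isPrefixOf (pvK4 ++ r) = false := by
    rw [← Bool.not_eq_true, List.isPrefixOf_iff_prefix]
    exact not_prefix_append pvK3 pvK4 r (by decide) (by decide)
  have hm : pvFirstMatch (pvK4 ++ r) pvEmojiPairs = some (pvK4, pvV4) := by
    simp [pvFirstMatch, pvEmojiPairs, h1, h2, h3, List.isPrefixOf_iff_prefix, List.prefix_append]
  rw [show pvK4 ++ r = ':' :: (pvK4.drop 1 ++ r) by simp [pvK4], pvScan]
  rw [show (':' : Char) :: (pvK4.drop 1 ++ r) = pvK4 ++ r by simp [pvK4]]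
  split
  · next p heq =>
    rw [hm] at heq
    injection heq with heq
    subst heq
    simp [pvK4]
  · next heq => rw [hm] at heq; exact absurd heq (by simp)

theorem pvScan_cons (c : Char) (t : List Char)
    (h1 : ¬ pvK1 <+: c :: t) (h2 : ¬ pvK2 <+: c :: t)
    (h3 : ¬ pvK3 <+: c :: t) (h4 : ¬ pvK4 <+: c :: t) :
    pvScan (c :: t) = c :: pvScan t := by
  have hm : pvFirstMatch (c :: t) pvEmojiPairs = none := by
    simp [pvFirstMatch, pvEmojiPairs, List.isPrefixOf_iff_prefix, h1, h2, h3, h4]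
  rw [pvScan]
  split
  · next p heq => rw [hm] at heq; exact absurd heq (by simp)
  · rfl

-- Pre_, on the list side
def pvPreL (s : List Char) : Prop :=
  ¬ (pvK2 ++ pvK1.drop 1) <:+: s ∧ ¬ (pvK3 ++ pvK1.drop 1) <:+: s ∧ ¬ (pvK3 ++ pvK2.drop 1) <:+: s ∧
  ¬ (pvK4 ++ pvK1.drop 1) <:+: s ∧ ¬ (pvK4 ++ pvK2.drop 1) <:+: s ∧ ¬ (pvK4 ++ pvK3.drop 1) <:+: s

theorem pvPreL_mono (s t : List Char) (h : t <:+: s) (hp : pvPreL s) : pvPreL t := by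
  obtain ⟨a, b, c, d, e, f⟩ := hp
  exact ⟨fun hm => a (hm.trans h), fun hm => b (hm.trans h), fun hm => c (hm.trans h),
         fun hm => d (hm.trans h), fun hm => e (hm.trans h), fun hm => f (hm.trans h)⟩

theorem pvMainAux : ∀ (n : Nat) (s : List Char), s.length ≤ n → pvPreL s →
    pvRep pvK4 pvV4 (pvRep pvK3 pvV3 (pvRep pvK2 pvV2 (pvRep pvK1 pvV1 s))) = pvScan s := by
  intro n
  induction n with
  | zero =>
    intro s hs _
    have : s = [] := List.eq_nil_of_length_eq_zero (Nat.le_zero.mp hs)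
    subst this
    simp [pvRep, pvScan_nil]
  | succ n ih =>
    intro s hs hp
    by_cases h1 : pvK1 <+: s
    · obtain ⟨r, rfl⟩ := h1
      have hr : r.length ≤ n := by simp [pvK1] at hs; omega
      rw [pvRep_head_match pvK1 pvV1 r (by simp [pvK1])]
      rw [pvRep_shift_nocolon pvK2 pvV2 (by decide) pvV1 _ (by decide)]
      rw [pvRep_shift_nocolon pvK3 pvV3 (by decide) pvV1 _ (by decide)]
      rw [pvRep_shift_nocolon pvK4 pvV4 (by decide) pvV1 _ (by decide)]
      rw [pvScan_match1, ih r hr (pvPreL_mono _ _ (List.suffix_append pvK1 r).isInfix hp)]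
    · by_cases h2 : pvK2 <+: s
      · obtain ⟨r, rfl⟩ := h2
        have hr : r.length ≤ n := by simp [pvK2] at hs; omega
        have hsh1 : pvRep pvK1 pvV1 (pvK2 ++ r) = pvK2 ++ pvRep pvK1 pvV1 r := by
          apply pvRep_shift
          intro j hj
          have hj7 : j < 7 := by simpa [pvK2] using hj
          interval_cases j
          · simpa using h1
          · simp [pvK2, pvK1, List.cons_prefix_cons]
          · simp [pvK2, pvK1, List.cons_prefix_cons]
          · simp [pvK2, pvK1, List.cons_prefix_cons]
          · simp [pvK2, pvK1, List.cons_prefix_cons]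
          · simp [pvK2, pvK1, List.cons_prefix_cons]
          · intro hpre
            rw [show (pvK2 ++ r).drop 6 = ':' :: r by simp [pvK2]] at hpre
            simp only [pvK1, List.cons_prefix_cons, true_and] at hpre
            obtain ⟨q, rfl⟩ := hpre
            refine hp.1 (List.IsPrefix.isInfix ?_)
            rw [← List.append_assoc]
            exact List.prefix_append _ _
        rw [hsh1, pvRep_head_match pvK2 pvV2 _ (by simp [pvK2])]
        rw [pvRep_shift_nocolon pvK3 pvV3 (by decide) pvV2 _ (by decide)]
        rw [pvRep_shift_nocolon pvK4 pvV4 (by decide) pvV2 _ (by decide)]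
        rw [pvScan_match2, ih r hr (pvPreL_mono _ _ (List.suffix_append pvK2 r).isInfix hp)]
      · by_cases h3 : pvK3 <+: s
        · obtain ⟨r, rfl⟩ := h3
          have hr : r.length ≤ n := by simp [pvK3] at hs; omega
          have hsh1 : pvRep pvK1 pvV1 (pvK3 ++ r) = pvK3 ++ pvRep pvK1 pvV1 r := by
            apply pvRep_shift
            intro j hj
            have hj6 : j < 6 := by simpa [pvK3] using hj
            interval_cases j
            · simpa using h1
            · simp [pvK3, pvK1, List.cons_prefix_cons]
            · simp [pvK3, pvK1, List.cons_prefix_cons]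
            · simp [pvK3, pvK1, List.cons_prefix_cons]
            · simp [pvK3, pvK1, List.cons_prefix_cons]
            · intro hpre
              rw [show (pvK3 ++ r).drop 5 = ':' :: r by simp [pvK3]] at hpre
              simp only [pvK1, List.cons_prefix_cons, true_and] at hpre
              obtain ⟨q, rfl⟩ := hpre
              refine hp.2.1 (List.IsPrefix.isInfix ?_)
              rw [← List.append_assoc]
              exact List.prefix_append _ _
          rw [hsh1]
          have hsh2 : pvRep pvK2 pvV2 (pvK3 ++ pvRep pvK1 pvV1 r)
              = pvK3 ++ pvRep pvK2 pvV2 (pvRep pvK1 pvV1 r) := by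
            apply pvRep_shift
            intro j hj
            have hj6 : j < 6 := by simpa [pvK3] using hj
            interval_cases j
            · exact not_prefix_append _ _ _ (by decide) (by decide)
            · simp [pvK3, pvK2, List.cons_prefix_cons]
            · simp [pvK3, pvK2, List.cons_prefix_cons]
            · simp [pvK3, pvK2, List.cons_prefix_cons]
            · simp [pvK3, pvK2, List.cons_prefix_cons]
            · intro hpre
              rw [show (pvK3 ++ pvRep pvK1 pvV1 r).drop 5 = ':' :: pvRep pvK1 pvV1 r by simp [pvK3]] at hpre
              simp only [pvK2, List.cons_prefix_cons, true_and] at hpre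
              have htl := pvRep_no_lt_prefix pvK1 pvV1 (by decide) r _ (by decide) hpre
              obtain ⟨q, rfl⟩ := htl
              refine hp.2.2.1 (List.IsPrefix.isInfix ?_)
              rw [← List.append_assoc]
              exact List.prefix_append _ _
          rw [hsh2, pvRep_head_match pvK3 pvV3 _ (by simp [pvK3])]
          rw [pvRep_shift_nocolon pvK4 pvV4 (by decide) pvV3 _ (by decide)]
          rw [pvScan_match3, ih r hr (pvPreL_mono _ _ (List.suffix_append pvK3 r).isInfix hp)]
        · by_cases h4 : pvK4 <+: s
          · obtain ⟨r, rfl⟩ := h4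
            have hr : r.length ≤ n := by simp [pvK4] at hs; omega
            have hsh1 : pvRep pvK1 pvV1 (pvK4 ++ r) = pvK4 ++ pvRep pvK1 pvV1 r := by
              apply pvRep_shift
              intro j hj
              have hj8 : j < 8 := by simpa [pvK4] using hj
              interval_cases j
              · simpa using h1
              · simp [pvK4, pvK1, List.cons_prefix_cons]
              · simp [pvK4, pvK1, List.cons_prefix_cons]
              · simp [pvK4, pvK1, List.cons_prefix_cons]
              · simp [pvK4, pvK1, List.cons_prefix_cons]
              · simp [pvK4, pvK1, List.cons_prefix_cons]
              · simp [pvK4, pvK1, List.cons_prefix_cons]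
              · intro hpre
                rw [show (pvK4 ++ r).drop 7 = ':' :: r by simp [pvK4]] at hpre
                simp only [pvK1, List.cons_prefix_cons, true_and] at hpre
                obtain ⟨q, rfl⟩ := hpre
                refine hp.2.2.2.1 (List.IsPrefix.isInfix ?_)
                rw [← List.append_assoc]
                exact List.prefix_append _ _
            rw [hsh1]
            have hsh2 : pvRep pvK2 pvV2 (pvK4 ++ pvRep pvK1 pvV1 r)
                = pvK4 ++ pvRep pvK2 pvV2 (pvRep pvK1 pvV1 r) := by
              apply pvRep_shift
              intro j hj
              have hj8 : j < 8 := by simpa [pvK4] using hj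
              interval_cases j
              · exact not_prefix_append _ _ _ (by decide) (by decide)
              · simp [pvK4, pvK2, List.cons_prefix_cons]
              · simp [pvK4, pvK2, List.cons_prefix_cons]
              · simp [pvK4, pvK2, List.cons_prefix_cons]
              · simp [pvK4, pvK2, List.cons_prefix_cons]
              · simp [pvK4, pvK2, List.cons_prefix_cons]
              · simp [pvK4, pvK2, List.cons_prefix_cons]
              · intro hpre
                rw [show (pvK4 ++ pvRep pvK1 pvV1 r).drop 7 = ':' :: pvRep pvK1 pvV1 r by simp [pvK4]] at hpre
                simp only [pvK2, List.cons_prefix_cons, true_and] at hpre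
                have htl := pvRep_no_lt_prefix pvK1 pvV1 (by decide) r _ (by decide) hpre
                obtain ⟨q, rfl⟩ := htl
                refine hp.2.2.2.2.1 (List.IsPrefix.isInfix ?_)
                rw [← List.append_assoc]
                exact List.prefix_append _ _
            rw [hsh2]
            have hsh3 : pvRep pvK3 pvV3 (pvK4 ++ pvRep pvK2 pvV2 (pvRep pvK1 pvV1 r))
                = pvK4 ++ pvRep pvK3 pvV3 (pvRep pvK2 pvV2 (pvRep pvK1 pvV1 r)) := by
              apply pvRep_shift
              intro j hj
              have hj8 : j < 8 := by simpa [pvK4] using hj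
              interval_cases j
              · exact not_prefix_append _ _ _ (by decide) (by decide)
              · simp [pvK4, pvK3, List.cons_prefix_cons]
              · simp [pvK4, pvK3, List.cons_prefix_cons]
              · simp [pvK4, pvK3, List.cons_prefix_cons]
              · simp [pvK4, pvK3, List.cons_prefix_cons]
              · simp [pvK4, pvK3, List.cons_prefix_cons]
              · simp [pvK4, pvK3, List.cons_prefix_cons]
              · intro hpre
                rw [show (pvK4 ++ pvRep pvK2 pvV2 (pvRep pvK1 pvV1 r)).drop 7
                    = ':' :: pvRep pvK2 pvV2 (pvRep pvK1 pvV1 r) by simp [pvK4]] at hpre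
                simp only [pvK3, List.cons_prefix_cons, true_and] at hpre
                have htl2 := pvRep_no_lt_prefix pvK2 pvV2 (by decide) _ _ (by decide) hpre
                have htl := pvRep_no_lt_prefix pvK1 pvV1 (by decide) r _ (by decide) htl2
                obtain ⟨q, rfl⟩ := htl
                refine hp.2.2.2.2.2 (List.IsPrefix.isInfix ?_)
                rw [← List.append_assoc]
                exact List.prefix_append _ _
            rw [hsh3, pvRep_head_match pvK4 pvV4 _ (by simp [pvK4])]
            rw [pvScan_match4, ih r hr (pvPreL_mono _ _ (List.suffix_append pvK4 r).isInfix hp)]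
          · cases s with
            | nil => simp [pvRep, pvScan_nil]
            | cons c t =>
              have hr : t.length ≤ n := by simp at hs; omega
              have hpt : pvPreL t := pvPreL_mono _ _ (List.suffix_cons c t).isInfix hp
              rw [pvRep_cons _ _ _ _ h1]
              have hn2 : ¬ pvK2 <+: c :: pvRep pvK1 pvV1 t := by
                intro hpre
                simp only [pvK2, List.cons_prefix_cons] at hpre
                obtain ⟨hc, htl⟩ := hpre
                have h' := pvRep_no_lt_prefix pvK1 pvV1 (by decide) t _ (by decide) htl
                exact h2 (by simp only [pvK2, List.cons_prefix_cons]; exact ⟨hc, h'⟩)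
              rw [pvRep_cons _ _ _ _ hn2]
              have hn3 : ¬ pvK3 <+: c :: pvRep pvK2 pvV2 (pvRep pvK1 pvV1 t) := by
                intro hpre
                simp only [pvK3, List.cons_prefix_cons] at hpre
                obtain ⟨hc, htl⟩ := hpre
                have h'' := pvRep_no_lt_prefix pvK2 pvV2 (by decide) _ _ (by decide) htl
                have h' := pvRep_no_lt_prefix pvK1 pvV1 (by decide) t _ (by decide) h''
                exact h3 (by simp only [pvK3, List.cons_prefix_cons]; exact ⟨hc, h'⟩)
              rw [pvRep_cons _ _ _ _ hn3]
              have hn4 : ¬ pvK4 <+: c :: pvRep pvK3 pvV3 (pvRep pvK2 pvV2 (pvRep pvK1 pvV1 t)) := by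
                intro hpre
                simp only [pvK4, List.cons_prefix_cons] at hpre
                obtain ⟨hc, htl⟩ := hpre
                have h3' := pvRep_no_lt_prefix pvK3 pvV3 (by decide) _ _ (by decide) htl
                have h2' := pvRep_no_lt_prefix pvK2 pvV2 (by decide) _ _ (by decide) h3'
                have h' := pvRep_no_lt_prefix pvK1 pvV1 (by decide) t _ (by decide) h2'
                exact h4 (by simp only [pvK4, List.cons_prefix_cons]; exact ⟨hc, h'⟩)
              rw [pvRep_cons _ _ _ _ hn4]
              rw [pvScan_cons c t h1 h2 h3 h4, ih t hr hpt]

theorem pvMain (s : List Char) (hp : pvPreL s) :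
    pvRep pvK4 pvV4 (pvRep pvK3 pvV3 (pvRep pvK2 pvV2 (pvRep pvK1 pvV1 s))) = pvScan s :=
  pvMainAux s.length s le_rfl hp

-- ===== VERDICT (by name: the statement is the Claim_ definition above) =====
theorem convertir_emojis_spec : Claim_equal_convertir_emojis := by
  intro texto _ hpre
  unfold Spec_convertir_emojis convertir_emojis convertir_emojis_alt
  obtain ⟨a, b, c, d, e, f⟩ := hpre
  have conv : ∀ (m : String), PySem.Str.isIn m texto = false → ¬ m.toList <:+: texto.toList := by
    intro m h
    rw [← PySem.Chars.isIn_eq_false_iff]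
    simpa [PySem.Str.isIn] using h
  have hL : pvPreL texto.toList := by
    refine ⟨?_, ?_, ?_, ?_, ?_, ?_⟩
    · rw [show pvK2 ++ pvK1.drop 1 = (":luffy:naruto:" : String).toList by decide]; exact conv _ a
    · rw [show pvK3 ++ pvK1.drop 1 = (":gojo:naruto:" : String).toList by decide]; exact conv _ b
    · rw [show pvK3 ++ pvK2.drop 1 = (":gojo:luffy:" : String).toList by decide]; exact conv _ c
    · rw [show pvK4 ++ pvK1.drop 1 = (":nezuko:naruto:" : String).toList by decide]; exact conv _ d
    · rw [show pvK4 ++ pvK2.drop 1 = (":nezuko:luffy:" : String).toList by decide]; exact conv _ e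
    · rw [show pvK4 ++ pvK3.drop 1 = (":nezuko:gojo:" : String).toList by decide]; exact conv _ f
  simp only [List.foldl, PySem.Str.replace, String.toList_ofList]
  rw [replace_eq_pvRep _ _ _ (by decide), replace_eq_pvRep _ _ _ (by decide),
      replace_eq_pvRep _ _ _ (by decide), replace_eq_pvRep _ _ _ (by decide)]
  exact congrArg String.ofList (pvMain texto.toList hL)
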